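-- pv_equiv track=rewrite | github.com/BatmanovSergey/Py_seminar | Seminar_3/HW/Taskdz3.5.py | neg_fiba
-- ===== SOURCE A (Python) =====
-- def neg_fiba(num: int):
--     a, b = 1, 1
--     list_nums = [0]
--     for i in range(num):
--         list_nums.append(a)
--         list_nums.insert(0, a * (-1)**i)
--         a, b = b, b + a
--     return list_nums
-- ===== SOURCE B (Python) =====
-- def neg_fiba(num: int):
--     # Build the positive half in one pass, then mirror it with the
--     # identity F(-k) = (-1)**(k+1) * F(k) instead of front-inserting.
--     right = [0]
--     a, b = 1, 1
--     for _ in range(num):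
--         right.append(a)
--         a, b = b, a + b
--     left = [right[k] * (-1) ** (k + 1) for k in range(num, 0, -1)]
--     return left + right
-- ===== Notes on version B (the rewrite author's own statement) =====
-- stated objective: alternative
-- what changed: B builds only the positive Fibonacci half with a single append-only loop and derives the negative half afterwards via the sign identity F(-k)=(-1)**(k+1)*F(k), instead of interleaving front-inserts into one growing list (avoiding A's O(n) insert(0,...) per step).
import Mathlib
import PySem

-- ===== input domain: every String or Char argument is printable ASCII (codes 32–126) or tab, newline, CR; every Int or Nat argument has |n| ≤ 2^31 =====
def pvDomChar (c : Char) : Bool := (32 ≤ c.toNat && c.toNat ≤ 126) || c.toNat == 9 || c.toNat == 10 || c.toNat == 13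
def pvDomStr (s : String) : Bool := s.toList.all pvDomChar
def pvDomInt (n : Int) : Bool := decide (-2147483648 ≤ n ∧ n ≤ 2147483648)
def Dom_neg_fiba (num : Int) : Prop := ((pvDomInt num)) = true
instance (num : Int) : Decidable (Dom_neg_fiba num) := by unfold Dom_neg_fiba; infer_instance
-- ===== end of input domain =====

-- B replaces A's interleaved front-inserts by one append-only loop for the positive
-- half plus a sign-transform pass for the negative half (objective: alternative).

-- ===== PORT A =====
-- loop body: list_nums.append(a); list_nums.insert(0, a * (-1)**i); a, b = b, b + a
-- (i ranges over range(num), hence 0 ≤ i, so (-1)**i is ported as (-1)^i.toNat)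
def neg_fiba (num : Int) : List Int :=
  (((PySem.List.pyRange 0 num 1).foldl
    (fun (st : Int × Int × List Int) i =>
      (st.2.1, st.2.1 + st.1, (st.1 * (-1) ^ i.toNat) :: (st.2.2 ++ [st.1])))
    (1, 1, [0]))).2.2

-- ===== PORT B =====
-- right-half loop: right.append(a); a, b = b, a + b
def neg_fiba_altLoop (num : Int) : Int × Int × List Int :=
  (PySem.List.pyRange 0 num 1).foldl
    (fun (st : Int × Int × List Int) _ =>
      (st.2.1, st.1 + st.2.1, st.2.2 ++ [st.1]))
    (1, 1, [0])

-- left = [right[k] * (-1)**(k+1) for k in range(num, 0, -1)]; k is always a valid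
-- index (1 ≤ k ≤ num < len(right)), so right[k] is ported via pyGetD (default never used)
def neg_fiba_alt (num : Int) : List Int :=
  let right := (neg_fiba_altLoop num).2.2
  let left := (PySem.List.pyRange num 0 (-1)).map
    (fun k => PySem.List.pyGetD right k 0 * (-1) ^ (k + 1).toNat)
  left ++ right

-- ===== PRECONDITION & SPEC =====
def Spec_neg_fiba (num : Int) (out : List Int) : Prop := out = neg_fiba_alt num
instance (num : Int) (out : List Int) : Decidable (Spec_neg_fiba num out) := by unfold Spec_neg_fiba; infer_instance

-- ===== CLAIM (what is proved, stated in full; the proofs are below) =====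
def Claim_equal_neg_fiba : Prop := ∀ (num : Int), Dom_neg_fiba num → Spec_neg_fiba num (neg_fiba num)

-- ===== LEMMAS AND PROOFS =====

-- F(1)=F(2)=1 shifted: pvFib n = F(n+1)
def pvFib : Nat → Int
  | 0 => 1
  | 1 => 1
  | n + 2 => pvFib (n + 1) + pvFib n

lemma pvA_loop (n : Nat) :
    (PySem.List.pyRange 0 (n : Int) 1).foldl
      (fun (st : Int × Int × List Int) i =>
        (st.2.1, st.2.1 + st.1, (st.1 * (-1) ^ i.toNat) :: (st.2.2 ++ [st.1])))
      (1, 1, [0]) =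
    (pvFib n, pvFib (n + 1),
      ((List.range n).map (fun j => pvFib j * (-1) ^ j)).reverse
        ++ 0 :: (List.range n).map pvFib) := by
  induction n with
  | zero => simp [PySem.List.pyRange_one_eq_nil, pvFib]
  | succ n ih =>
    have hcast : ((n + 1 : Nat) : Int) = (n : Int) + 1 := by push_cast; ring
    rw [hcast, PySem.List.pyRange_one_succ_right (by positivity)]
    rw [List.foldl_append, ih]
    simp only [List.foldl_cons, List.foldl_nil, List.range_succ, List.map_append,
      List.reverse_append, List.map_cons, List.map_nil, List.reverse_cons,
      List.reverse_nil, List.nil_append, List.singleton_append]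
    rw [show pvFib (n+1) + pvFib n = pvFib (n + 1 + 1) from by simp [pvFib]]
    simp [Int.toNat_natCast, List.append_assoc]

lemma pvB_loop (n : Nat) :
    neg_fiba_altLoop (n : Int) =
      (pvFib n, pvFib (n + 1), 0 :: (List.range n).map pvFib) := by
  unfold neg_fiba_altLoop
  induction n with
  | zero => simp [PySem.List.pyRange_one_eq_nil, pvFib]
  | succ n ih =>
    have hcast : ((n + 1 : Nat) : Int) = (n : Int) + 1 := by push_cast; ring
    rw [hcast, PySem.List.pyRange_one_succ_right (by positivity)]
    rw [List.foldl_append, ih]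
    simp only [List.foldl_cons, List.foldl_nil, List.range_succ, List.map_append]
    rw [show pvFib n + pvFib (n+1) = pvFib (n + 1 + 1) from by simp [pvFib, add_comm]]
    simp

-- B's left comprehension, restricted to the countdown range m..1, equals the
-- reversed signed prefix of length m (m ≤ n so every index hits the table).
lemma pvB_left (n : Nat) (m : Nat) (hmn : m ≤ n) :
    (PySem.List.pyRange (m : Int) 0 (-1)).map
      (fun k => PySem.List.pyGetD (0 :: (List.range n).map pvFib) k 0
                  * (-1) ^ (k + 1).toNat) =
    ((List.range m).map (fun j => pvFib j * (-1) ^ j)).reverse := by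
  induction m with
  | zero => simp [PySem.List.pyRange_neg_one_eq_nil]
  | succ m ih =>
    have hcast : ((m + 1 : Nat) : Int) = (m : Int) + 1 := by push_cast; ring
    rw [hcast, PySem.List.pyRange_neg_one_cons (by positivity)]
    have : ((m : Int) + 1 - 1) = (m : Int) := by ring
    rw [List.map_cons, this, ih (by omega)]
    rw [List.range_succ, List.map_append, List.reverse_append]
    simp only [List.map_cons, List.map_nil, List.reverse_cons, List.reverse_nil,
      List.nil_append, List.singleton_append]
    refine congrArg (fun x => x :: _) ?_
    have hidx : PySem.List.pyGetD (0 :: (List.range n).map pvFib) ((m : Int) + 1) 0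
        = pvFib m := by
      have h1 : ((m : Int) + 1) = ((m + 1 : Nat) : Int) := by push_cast; ring
      rw [h1, PySem.List.pyGetD_natCast]
      simp only [List.getD_cons_succ]
      rw [List.getD_eq_getElem _ _ (by simpa using hmn)]
      simp
    rw [hidx]
    have hexp : (((m : Int) + 1) + 1).toNat = m + 2 := by omega
    rw [hexp]
    ring

-- ===== VERDICT (by name: the statement is the Claim_ definition above) =====
theorem neg_fiba_spec : Claim_equal_neg_fiba := by
  intro num _
  unfold Spec_neg_fiba neg_fiba neg_fiba_alt
  rcases le_or_gt num 0 with h | h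
  · rw [PySem.List.pyRange_one_eq_nil h, PySem.List.pyRange_neg_one_eq_nil h]
    simp [neg_fiba_altLoop, PySem.List.pyRange_one_eq_nil h]
  · obtain ⟨n, rfl⟩ : ∃ n : Nat, num = (n : Int) :=
      ⟨num.toNat, (Int.toNat_of_nonneg h.le).symm⟩
    rw [pvA_loop, pvB_loop]
    simp only []
    rw [pvB_left n n le_rfl]
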